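-- pv_equiv track=rewrite | github.com/MomorioUHT/AetheriaDomainOfMoonshadowAndStarlight | [Hard]-ArthersLuminousOresConundrum.py | tiltDown
-- ===== SOURCE A (Python) =====
-- def tiltDown(grid: list):
--     for col in range(len(grid[0])):
--         stack = []
--         for row in range(len(grid) - 1, -1, -1):
--             if grid[row][col] != ".":
--                 stack.append(grid[row][col])
--
--         for row in range(len(grid)):
--             grid[len(grid) - 1 - row][col] = stack[row] if row < len(stack) else "."
--
--     return grid
-- ===== SOURCE B (Python) =====
-- def tiltDown(grid: list):
--     for col in range(len(grid[0])):
--         w = len(grid) - 1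
--         for row in range(len(grid) - 1, -1, -1):
--             v = grid[row][col]
--             if v != ".":
--                 grid[w][col] = v
--                 w -= 1
--         for row in range(w, -1, -1):
--             grid[row][col] = "."
--     return grid
-- ===== Notes on version B (the rewrite author's own statement) =====
-- stated objective: alternative
-- what changed: Per column, instead of building a stack of non-'.' cells and replaying it in a second index-arithmetic pass, B compacts in place with a moving write pointer during a single bottom-up scan and then fills the remaining top cells with '.'.
import Mathlib
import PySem

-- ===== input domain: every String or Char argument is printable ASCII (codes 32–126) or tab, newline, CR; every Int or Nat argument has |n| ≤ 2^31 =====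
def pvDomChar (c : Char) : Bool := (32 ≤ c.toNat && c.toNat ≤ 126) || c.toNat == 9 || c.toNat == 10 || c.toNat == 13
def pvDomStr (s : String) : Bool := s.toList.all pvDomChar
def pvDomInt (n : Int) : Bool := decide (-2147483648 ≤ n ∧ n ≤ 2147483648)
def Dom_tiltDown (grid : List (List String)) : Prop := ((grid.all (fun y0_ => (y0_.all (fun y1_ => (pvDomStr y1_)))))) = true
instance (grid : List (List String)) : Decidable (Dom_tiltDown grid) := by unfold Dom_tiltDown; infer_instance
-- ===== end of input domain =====

-- B replaces A's per-column stack-then-replay with a single in-place write-pointer compaction; same cost, different decomposition.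
-- Both Pythons mutate `grid` in place and return it; the theorems below are about the returned value.

-- shared cell accessors: grid[r][c] read / write; exact for the in-range indices guaranteed by Pre_
def pvRead (g : List (List String)) (r c : Nat) : String := (g.getD r []).getD c ""
def pvWrite (g : List (List String)) (r c : Nat) (v : String) : List (List String) :=
  g.modify r (fun row => row.set c v)

-- ===== PORT A =====
def tiltDown (grid : List (List String)) : List (List String) :=
  (List.range (grid.headD []).length).foldl (fun g col =>
    let stack := ((List.range g.length).reverse).foldl
      (fun st row => if pvRead g row col ≠ "." then st ++ [pvRead g row col] else st) []
    (List.range g.length).foldl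
      (fun g2 row => pvWrite g2 (g.length - 1 - row) col (stack.getD row ".")) g) grid

-- ===== PORT B =====
def tiltDown_alt (grid : List (List String)) : List (List String) :=
  (List.range (grid.headD []).length).foldl (fun g col =>
    let p := ((List.range g.length).reverse).foldl
      (fun (p : List (List String) × Int) row =>
        let v := pvRead p.1 row col
        if v ≠ "." then (pvWrite p.1 p.2.toNat col v, p.2 - 1) else p)
      (g, (g.length : Int) - 1)
    (PySem.List.pyRange p.2 (-1) (-1)).foldl (fun g2 r => pvWrite g2 r.toNat col ".") p.1) grid

-- ===== PRECONDITION & SPEC =====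
-- Pre_ excludes exactly the inputs where Python A raises: the empty grid (grid[0] → IndexError) and
-- grids with a row shorter than the first row (grid[row][col] → IndexError).
def Pre_tiltDown (grid : List (List String)) : Prop :=
  grid ≠ [] ∧ ∀ row ∈ grid, (grid.headD []).length ≤ row.length
instance (grid : List (List String)) : Decidable (Pre_tiltDown grid) := by
  unfold Pre_tiltDown; infer_instance
def pvWitness_tiltDown : List (List String) := [["a", "."], [".", "b"]]
def Spec_tiltDown (grid : List (List String)) (out : List (List String)) : Prop := out = tiltDown_alt grid
instance (grid : List (List String)) (out : List (List String)) : Decidable (Spec_tiltDown grid out) := by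
  unfold Spec_tiltDown; infer_instance

-- ===== CLAIM (what is proved, stated in full; the proofs are below) =====
def Claim_equal_tiltDown : Prop := ∀ (grid : List (List String)), Dom_tiltDown grid → Pre_tiltDown grid → Spec_tiltDown grid (tiltDown grid)

-- ===== LEMMAS AND PROOFS =====

-- the non-'.' cells of column c among rows 0..n-1, collected bottom-up (A's stack)
def pvVals (c : Nat) (g : List (List String)) : Nat → List String
  | 0 => []
  | n + 1 => (if pvRead g n c ≠ "." then [pvRead g n c] else []) ++ pvVals c g n

-- write the collected values back at positions wr, wr-1, … (the order both programs write them)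
def pvReplay (c : Nat) : List (List String) → Int → List String → List (List String)
  | g, _, [] => g
  | g, wr, v :: vs => pvReplay c (pvWrite g wr.toNat c v) (wr - 1) vs

theorem pvRead_write_ne (g : List (List String)) (r w c c' : Nat) (v : String) (h : w ≠ r) :
    pvRead (pvWrite g w c' v) r c = pvRead g r c := by
  simp [pvRead, pvWrite, List.getD, h]

theorem pvVals_length (c : Nat) (g : List (List String)) (n : Nat) : (pvVals c g n).length ≤ n := by
  induction n with
  | zero => simp [pvVals]
  | succ n ih => simp only [pvVals]; split <;> simp <;> omega

theorem pvVals_write_high (c c' : Nat) (g : List (List String)) (v : String) (n w : Nat)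
    (h : n ≤ w) : pvVals c (pvWrite g w c' v) n = pvVals c g n := by
  induction n with
  | zero => rfl
  | succ n ih =>
    have hw : w ≠ n := by omega
    simp only [pvVals, pvRead_write_ne g n w c c' v hw, ih (by omega)]

theorem pvStack_eq (c : Nat) (g : List (List String)) (n : Nat) (acc : List String) :
    ((List.range n).reverse).foldl
      (fun st row => if pvRead g row c ≠ "." then st ++ [pvRead g row c] else st) acc
    = acc ++ pvVals c g n := by
  induction n generalizing acc with
  | zero => simp [pvVals]
  | succ n ih =>
    rw [List.range_succ, List.reverse_append]
    simp only [List.reverse_cons, List.reverse_nil, List.nil_append, List.singleton_append,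
      List.foldl_cons, pvVals]
    rw [ih]
    split <;> simp

theorem pvScan (c : Nat) (n : Nat) (g : List (List String)) (wr : Int) (h : (n : Int) - 1 ≤ wr) :
    ((List.range n).reverse).foldl
      (fun (p : List (List String) × Int) row =>
        if pvRead p.1 row c ≠ "." then (pvWrite p.1 p.2.toNat c (pvRead p.1 row c), p.2 - 1) else p)
      (g, wr)
    = (pvReplay c g wr (pvVals c g n), wr - (pvVals c g n).length) := by
  induction n generalizing g wr with
  | zero => simp [pvVals, pvReplay]
  | succ n ih =>
    rw [List.range_succ, List.reverse_append]
    simp only [List.reverse_cons, List.reverse_nil, List.nil_append, List.singleton_append,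
      List.foldl_cons]
    by_cases hv : pvRead g n c = "."
    · simp only [hv, ne_eq, not_true_eq_false, if_false]
      rw [ih g wr (by omega)]
      simp [pvVals, hv]
    · simp only [ne_eq, hv, not_false_eq_true, if_true]
      rw [ih (pvWrite g wr.toNat c (pvRead g n c)) (wr - 1) (by omega)]
      have hnw : n ≤ wr.toNat := by omega
      rw [pvVals_write_high c c g (pvRead g n c) n wr.toNat hnw]
      simp only [pvVals, ne_eq, hv, not_false_eq_true, if_true, List.singleton_append, pvReplay]
      rw [Prod.mk.injEq]
      refine ⟨rfl, ?_⟩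
      simp only [List.length_cons]
      push_cast
      ring

theorem pvReplayA (c : Nat) (S : List String) (g : List (List String)) (wr : Nat)
    (h : S.length ≤ wr + 1) :
    (List.range S.length).foldl (fun g2 row => pvWrite g2 (wr - row) c (S.getD row ".")) g
    = pvReplay c g (wr : Int) S := by
  induction S generalizing g wr with
  | nil => simp [pvReplay]
  | cons v vs ih =>
    rw [List.length_cons, List.range_succ_eq_map]
    simp only [List.foldl_cons, List.foldl_map, Nat.sub_zero, List.getD_cons_zero]
    cases wr with
    | zero =>
      have hvs : vs = [] := by
        simp only [List.length_cons] at h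
        exact List.eq_nil_of_length_eq_zero (by omega)
      subst hvs
      simp [pvReplay]
    | succ m =>
      have hfun : (fun (g2 : List (List String)) (row : Nat) =>
            pvWrite g2 (m + 1 - row.succ) c ((v :: vs).getD row.succ "."))
          = (fun (g2 : List (List String)) (row : Nat) =>
            pvWrite g2 (m - row) c (vs.getD row ".")) := by
        funext g2 row
        rw [List.getD_cons_succ]
        congr 1
        omega
      rw [hfun]
      have h' : vs.length ≤ m + 1 := by
        simp only [List.length_cons] at h
        omega
      rw [ih (pvWrite g (m + 1) c v) m h']
      simp only [pvReplay, Int.toNat_natCast]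
      congr 1
      push_cast
      ring

theorem pvCol (g : List (List String)) (c : Nat) :
    (List.range g.length).foldl
      (fun g2 row => pvWrite g2 (g.length - 1 - row) c ((pvVals c g g.length).getD row ".")) g
    = (let p := ((List.range g.length).reverse).foldl
          (fun (p : List (List String) × Int) row =>
            if pvRead p.1 row c ≠ "." then (pvWrite p.1 p.2.toNat c (pvRead p.1 row c), p.2 - 1) else p)
          (g, (g.length : Int) - 1)
       (PySem.List.pyRange p.2 (-1) (-1)).foldl (fun g2 r => pvWrite g2 r.toNat c ".") p.1) := by
  cases hn : g.length with
  | zero =>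
    simp [PySem.List.pyRange_neg_one_eq_nil (by norm_num : (-1 : Int) ≤ -1)]
  | succ m =>
    rw [pvScan c (m + 1) g (((m + 1 : Nat) : Int) - 1) (le_refl _)]
    have hm : ((m + 1 : Nat) : Int) - 1 = (m : Int) := by push_cast; ring
    rw [hm]
    set S := pvVals c g (m + 1) with hS
    have hk : S.length ≤ m + 1 := by rw [hS]; exact pvVals_length c g (m + 1)
    set k := S.length with hkdef
    -- A side: split the write loop into the replay of S and the dot fill
    have hsplit : m + 1 = k + (m + 1 - k) := by omega
    have hsub : ∀ row : Nat, m + 1 - 1 - row = m - row := by intro row; omega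
    simp only [hsub]
    rw [hsplit, List.range_add, List.foldl_append]
    rw [show (List.range k).foldl (fun g2 row => pvWrite g2 (m - row) c (S.getD row ".")) g
        = pvReplay c g (m : Int) S from pvReplayA c S g m (by omega)]
    rw [List.foldl_map]
    have hfunA : (fun (g2 : List (List String)) (j : Nat) =>
          pvWrite g2 (m - (k + j)) c (S.getD (k + j) "."))
        = (fun (g2 : List (List String)) (j : Nat) => pvWrite g2 (m - k - j) c ".") := by
      funext g2 j
      rw [List.getD_eq_default _ _ (by omega)]
      congr 1
      omega
    rw [hfunA]
    -- B side: the countdown dot fill is the same fold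
    show _ = (PySem.List.pyRange ((m : Int) - k) (-1) (-1)).foldl
        (fun g2 r => pvWrite g2 r.toNat c ".") (pvReplay c g (m : Int) S)
    rw [PySem.List.pyRange_neg_one]
    have htn : ((m : Int) - k - (-1)).toNat = m + 1 - k := by omega
    rw [htn, List.foldl_map]
    refine Eq.symm (PySem.List.foldl_congr_mem _ _ _ _ ?_)
    intro acc j hj
    rw [List.mem_range] at hj
    congr 1
    omega

-- ===== VERDICT (by name: the statement is the Claim_ definition above) =====
theorem tiltDown_spec : Claim_equal_tiltDown := by
  intro grid _ _
  show tiltDown grid = tiltDown_alt grid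
  unfold tiltDown tiltDown_alt
  congr 1
  funext g col
  rw [pvStack_eq col g g.length []]
  simp only [List.nil_append]
  exact pvCol g col
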